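-- pv_equiv track=rewrite | github.com/EBlundellSparta/Data21Notes | examples_and_challenges/daily_challenge.py | is_triangle_number
-- ===== SOURCE A (Python) =====
-- def is_triangle_number(number: int):
--     n = 0
--     confirmation = False
--     while 0 <= n <= 250:
--         if n * (n+1) == 2 * number:
--             confirmation = True
--             break
--         else:
--             n += 1
--     return confirmation
-- ===== SOURCE B (Python) =====
-- def is_triangle_number(number: int):
--     # Binary search the monotone n*(n+1) on [0, 250] for 2*number.
--     target = 2 * number
--     lo, hi = 0, 250
--     while lo <= hi:
--         mid = (lo + hi) // 2
--         t = mid * (mid + 1)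
--         if t == target:
--             return True
--         elif t < target:
--             lo = mid + 1
--         else:
--             hi = mid - 1
--     return False
-- ===== Notes on version B (the rewrite author's own statement) =====
-- stated objective: faster
-- what changed: Replaces the linear scan of n=0..250 with a binary search over the monotone map n->n*(n+1) on [0,250].
import Mathlib
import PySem

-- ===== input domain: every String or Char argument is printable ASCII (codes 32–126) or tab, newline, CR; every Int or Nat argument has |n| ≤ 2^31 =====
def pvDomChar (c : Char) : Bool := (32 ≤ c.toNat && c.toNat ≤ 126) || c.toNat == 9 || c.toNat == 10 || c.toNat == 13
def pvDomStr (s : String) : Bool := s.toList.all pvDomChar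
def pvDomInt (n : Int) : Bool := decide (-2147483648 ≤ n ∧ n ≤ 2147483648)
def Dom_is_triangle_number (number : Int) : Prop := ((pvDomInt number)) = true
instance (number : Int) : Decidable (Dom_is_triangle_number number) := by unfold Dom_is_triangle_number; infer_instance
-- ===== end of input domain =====

-- B replaces A's linear scan n=0..250 with a binary search over the monotone n*(n+1) on [0,250] (fewer iterations, same result).


-- ===== PORT A =====
-- A's while loop: n counts up from 0 while 0 <= n <= 250; break with confirmation = True on hit.
def pvALoop (number : Int) (n : Int) (confirmation : Bool) : Bool :=
  if _h : 0 ≤ n ∧ n ≤ 250 then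
    if n * (n + 1) == 2 * number then true
    else pvALoop number (n + 1) confirmation
  else confirmation
termination_by (251 - n).toNat
decreasing_by omega

def is_triangle_number (number : Int) : Bool := pvALoop number 0 false

-- ===== PORT B =====
-- B's binary-search loop over [lo, hi] for target = 2*number.
def pvBSearch (target lo hi : Int) : Bool :=
  if _h : lo ≤ hi then
    let mid := PySem.Int.floordiv (lo + hi) 2
    let t := mid * (mid + 1)
    if t == target then true
    else if t < target then pvBSearch target (mid + 1) hi
    else pvBSearch target lo (mid - 1)
  else false
termination_by (hi - lo + 1).toNat
decreasing_by
  · have := PySem.Int.floordiv_two_mid_bounds (lo := lo) (hi := hi) (by omega)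
    omega
  · have := PySem.Int.floordiv_two_mid_bounds (lo := lo) (hi := hi) (by omega)
    omega

def is_triangle_number_alt (number : Int) : Bool := pvBSearch (2 * number) 0 250

-- ===== PRECONDITION & SPEC =====
def Spec_is_triangle_number (number : Int) (out : Bool) : Prop := out = is_triangle_number_alt number
instance (number : Int) (out : Bool) : Decidable (Spec_is_triangle_number number out) := by unfold Spec_is_triangle_number; infer_instance

-- ===== CLAIM (what is proved, stated in full; the proofs are below) =====
def Claim_equal_is_triangle_number : Prop := ∀ (number : Int), Dom_is_triangle_number number → Spec_is_triangle_number number (is_triangle_number number)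

-- ===== LEMMAS AND PROOFS =====

-- n*(n+1) is monotone on the nonnegatives.
theorem pv_mono {a b : Int} (ha : 0 ≤ a) (hab : a ≤ b) : a * (a + 1) ≤ b * (b + 1) := by
  nlinarith

-- A's loop returns true iff some k in [n, 250] hits 2*number (when started with confirmation = false).
theorem pvALoop_iff (number n : Int) (hn : 0 ≤ n) :
    pvALoop number n false = true ↔ ∃ k : Int, n ≤ k ∧ k ≤ 250 ∧ k * (k + 1) = 2 * number := by
  by_cases h : 0 ≤ n ∧ n ≤ 250
  · rw [pvALoop, dif_pos h]
    by_cases hhit : n * (n + 1) = 2 * number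
    · rw [if_pos (by simpa using hhit)]
      exact ⟨fun _ => ⟨n, le_refl n, h.2, hhit⟩, fun _ => rfl⟩
    · rw [if_neg (by simpa using hhit), pvALoop_iff number (n + 1) (by omega)]
      constructor
      · rintro ⟨k, h1, h2, h3⟩; exact ⟨k, by omega, h2, h3⟩
      · rintro ⟨k, h1, h2, h3⟩
        refine ⟨k, by rcases lt_or_eq_of_le h1 with h' | h'; omega; exact absurd (h' ▸ h3) hhit, h2, h3⟩
  · rw [pvALoop, dif_neg h]
    simp only [Bool.false_eq_true, false_iff]
    rintro ⟨k, h1, h2, _⟩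
    -- started outside [0,250]: since the loop in A starts at n = 0 this case has n > 250
    omega
termination_by (251 - n).toNat
decreasing_by omega

-- B's binary search is correct on nonnegative ranges, by monotonicity of k*(k+1).
theorem pvBSearch_iff (target lo hi : Int) (hlo : 0 ≤ lo) :
    pvBSearch target lo hi = true ↔ ∃ k : Int, lo ≤ k ∧ k ≤ hi ∧ k * (k + 1) = target := by
  by_cases h : lo ≤ hi
  · have hmid := PySem.Int.floordiv_two_mid_bounds (lo := lo) (hi := hi) h
    rw [pvBSearch, dif_pos h]
    set mid := PySem.Int.floordiv (lo + hi) 2 with hm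
    by_cases hhit : mid * (mid + 1) = target
    · rw [if_pos (by simpa using hhit)]
      exact ⟨fun _ => ⟨mid, hmid.1, hmid.2, hhit⟩, fun _ => rfl⟩
    · rw [if_neg (by simpa using hhit)]
      by_cases hlt : mid * (mid + 1) < target
      · rw [if_pos hlt, pvBSearch_iff target (mid + 1) hi (by omega)]
        constructor
        · rintro ⟨k, h1, h2, h3⟩; exact ⟨k, by omega, h2, h3⟩
        · rintro ⟨k, h1, h2, h3⟩
          refine ⟨k, ?_, h2, h3⟩
          by_contra hk
          have : k * (k + 1) ≤ mid * (mid + 1) := pv_mono (by omega) (by omega)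
          omega
      · rw [if_neg hlt, pvBSearch_iff target lo (mid - 1) hlo]
        constructor
        · rintro ⟨k, h1, h2, h3⟩; exact ⟨k, h1, by omega, h3⟩
        · rintro ⟨k, h1, h2, h3⟩
          refine ⟨k, h1, ?_, h3⟩
          by_contra hk
          have : mid * (mid + 1) ≤ k * (k + 1) := pv_mono (by omega) (by omega)
          omega
  · rw [pvBSearch, dif_neg h]
    simp only [Bool.false_eq_true, false_iff]
    rintro ⟨k, h1, h2, _⟩; omega
termination_by (hi - lo + 1).toNat
decreasing_by
  · have := PySem.Int.floordiv_two_mid_bounds (lo := lo) (hi := hi) (by omega)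
    omega
  · have := PySem.Int.floordiv_two_mid_bounds (lo := lo) (hi := hi) (by omega)
    omega

-- ===== VERDICT (by name: the statement is the Claim_ definition above) =====
theorem is_triangle_number_spec : Claim_equal_is_triangle_number := by
  intro number _
  unfold Spec_is_triangle_number is_triangle_number is_triangle_number_alt
  rw [Bool.eq_iff_iff, pvALoop_iff number 0 (le_refl 0), pvBSearch_iff _ _ _ (le_refl 0)]
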